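-- pv_equiv track=rewrite | github.com/andradenathan/topicos-especiais-programacao-2024-2 | src/week-2/palindromes.py | is_mirrored_string
-- ===== SOURCE A (Python) =====
-- mirrored_string = {
--     "A": "A",
--     "E": "3",
--     "H": "H",
--     "I": "I",
--     "J": "L",
--     "L": "J",
--     "M": "M",
--     "O": "O",
--     "S": "2",
--     "T": "T",
--     "U": "U",
--     "V": "V",
--     "W": "W",
--     "X": "X",
--     "Y": "Y",
--     "Z": "5",
--     "1": "1",
--     "2": "S",
--     "3": "E",
--     "5": "Z",
--     "8": "8"
-- }
--
-- def is_mirrored_string(s):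
--     mirrored = ""
--     for c in s:
--         if c in mirrored_string:
--             mirrored += mirrored_string[c]
--         else:
--             return False
--     if mirrored == s[::-1]:
--         return True
--     return False
-- ===== SOURCE B (Python) =====
-- mirrored_string = {
--     "A": "A",
--     "E": "3",
--     "H": "H",
--     "I": "I",
--     "J": "L",
--     "L": "J",
--     "M": "M",
--     "O": "O",
--     "S": "2",
--     "T": "T",
--     "U": "U",
--     "V": "V",
--     "W": "W",
--     "X": "X",
--     "Y": "Y",
--     "Z": "5",
--     "1": "1",
--     "2": "S",
--     "3": "E",
--     "5": "Z",
--     "8": "8"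
-- }
--
--
-- def is_mirrored_string(s):
--     # Two-pointer scan from both ends; the mirror table is an involution, so
--     # checking mirror(s[lo]) == s[hi] for lo < hi plus the middle character
--     # is equivalent to A's build-and-reverse comparison.
--     lo, hi = 0, len(s) - 1
--     while lo < hi:
--         m = mirrored_string.get(s[lo])
--         if m is None or m != s[hi]:
--             return False
--         lo += 1
--         hi -= 1
--     if lo == hi:
--         return mirrored_string.get(s[lo]) == s[lo]
--     return True
-- ===== Notes on version B (the rewrite author's own statement) =====
-- stated objective: alternative
-- what changed: B replaces A's build-the-mirrored-string-then-compare-with-s[::-1] pass by a two-pointer scan moving inward from both ends (plus a middle-character self-mirror check), constructing no intermediate string; correctness uses that the mirror table is an involution.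
import Mathlib
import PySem

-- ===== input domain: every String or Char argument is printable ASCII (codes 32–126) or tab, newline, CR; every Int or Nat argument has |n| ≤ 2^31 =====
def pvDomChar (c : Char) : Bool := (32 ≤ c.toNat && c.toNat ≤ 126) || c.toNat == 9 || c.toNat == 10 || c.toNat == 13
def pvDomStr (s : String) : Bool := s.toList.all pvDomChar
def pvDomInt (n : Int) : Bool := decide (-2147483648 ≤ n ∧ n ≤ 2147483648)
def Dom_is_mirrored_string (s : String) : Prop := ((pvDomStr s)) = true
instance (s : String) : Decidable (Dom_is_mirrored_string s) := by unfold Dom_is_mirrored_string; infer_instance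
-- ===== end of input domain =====

-- B replaces A's build-then-compare-with-s[::-1] pass by a two-pointer scan from both
-- ends (no intermediate string); objective: alternative (no speed claim).

-- shared module constant: the mirror table
def mirroredTable : PySem.Dict Char Char := PySem.Dict.ofList
  [('A','A'),('E','3'),('H','H'),('I','I'),('J','L'),('L','J'),('M','M'),('O','O'),
   ('S','2'),('T','T'),('U','U'),('V','V'),('W','W'),('X','X'),('Y','Y'),('Z','5'),
   ('1','1'),('2','S'),('3','E'),('5','Z'),('8','8')]

-- ===== PORT A =====
-- the loop of A: builds `mirrored` (as a char list), early-return None on a missing key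
def mirrorGo : List Char → List Char → Option (List Char)
  | [], acc => some acc
  | c :: rest, acc =>
    match mirroredTable.get? c with
    | some m => mirrorGo rest (acc ++ [m])
    | none => none

def is_mirrored_string (s : String) : Bool :=
  match mirrorGo s.toList [] with
  | none => false
  | some mirrored =>
    -- mirrored == s[::-1]
    if some mirrored = PySem.List.slice? s.toList none none (-1) then true else false

-- ===== PORT B =====
-- B's while loop: lo/hi as Int two-pointers (hi starts at len-1, may be -1 on "");
-- s[lo]/s[hi] are in range whenever accessed (0 ≤ lo ≤ hi < n), ported as getD via toNat.
def mirrorPairs (cs : List Char) (lo hi : Int) : Bool :=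
  if lo < hi then
    -- Python binds m = mirrored_string.get(s[lo]) once; inlined here
    if mirroredTable.get? (cs.getD lo.toNat ' ') = none ∨
       mirroredTable.get? (cs.getD lo.toNat ' ') ≠ some (cs.getD hi.toNat ' ') then false
    else mirrorPairs cs (lo + 1) (hi - 1)
  else if lo = hi then
    mirroredTable.get? (cs.getD lo.toNat ' ') == some (cs.getD lo.toNat ' ')
  else true
termination_by (hi + 1 - lo).toNat
decreasing_by omega

def is_mirrored_string_alt (s : String) : Bool :=
  let cs := s.toList
  mirrorPairs cs 0 ((cs.length : Int) - 1)

-- ===== PRECONDITION & SPEC =====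
def Spec_is_mirrored_string (s : String) (out : Bool) : Prop := out = is_mirrored_string_alt s
instance (s : String) (out : Bool) : Decidable (Spec_is_mirrored_string s out) := by unfold Spec_is_mirrored_string; infer_instance

-- ===== CLAIM (what is proved, stated in full; the proofs are below) =====
def Claim_equal_is_mirrored_string : Prop := ∀ (s : String), Dom_is_mirrored_string s → Spec_is_mirrored_string s (is_mirrored_string s)

-- ===== LEMMAS AND PROOFS =====

-- the mirror table is an involution: get? c = some m implies get? m = some c
theorem mirror_involution (c m : Char) (h : mirroredTable.get? c = some m) :
    mirroredTable.get? m = some c := by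
  have hm := PySem.Dict.mem_items_of_get?_eq_some mirroredTable h
  have hit : mirroredTable.items =
    [('A','A'),('E','3'),('H','H'),('I','I'),('J','L'),('L','J'),('M','M'),('O','O'),
     ('S','2'),('T','T'),('U','U'),('V','V'),('W','W'),('X','X'),('Y','Y'),('Z','5'),
     ('1','1'),('2','S'),('3','E'),('5','Z'),('8','8')] := by rfl
  rw [hit] at hm
  fin_cases hm <;> decide

-- ---- characterisation of A ----
def mapMirror : List Char → Option (List Char)
  | [] => some []
  | c :: rest =>
    match mirroredTable.get? c with
    | some m => (mapMirror rest).map (m :: ·)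
    | none => none

theorem mirrorGo_eq (cs : List Char) : ∀ acc, mirrorGo cs acc = (mapMirror cs).map (acc ++ ·) := by
  induction cs with
  | nil => intro acc; simp [mirrorGo, mapMirror]
  | cons c rest ih =>
    intro acc
    simp only [mirrorGo, mapMirror]
    cases h : mirroredTable.get? c with
    | none => rfl
    | some m =>
      simp only [ih]
      cases mapMirror rest <;> simp

theorem mapMirror_iff (cs : List Char) : ∀ ys : List Char, ys.length = cs.length →
    (mapMirror cs = some ys ↔
      ∀ i < cs.length, mirroredTable.get? (cs.getD i ' ') = some (ys.getD i ' ')) := by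
  induction cs with
  | nil =>
    intro ys hl
    simp at hl
    simp [mapMirror, hl]
  | cons c rest ih =>
    intro ys hl
    cases ys with
    | nil => simp at hl
    | cons y ys' =>
      simp only [List.length_cons] at hl
      simp only [mapMirror]
      cases h : mirroredTable.get? c with
      | none =>
        constructor
        · intro h'; exact absurd h' (by simp)
        · intro h'
          have := h' 0 (by simp)
          simp [h] at this
      | some m =>
        have hrest := ih ys' (by omega)
        constructor
        · intro h'
          cases hm : mapMirror rest with
          | none => rw [hm] at h'; simp at h'
          | some zs =>
            rw [hm] at h'; simp at h'
            obtain ⟨hmy, hzs⟩ := h'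
            intro i hi
            cases i with
            | zero => simp [h, hmy]
            | succ j =>
              have := (hrest.mp (by rw [hm, hzs])) j (by simpa using hi)
              simpa using this
        · intro h'
          have h0 := h' 0 (by simp)
          simp [h] at h0
          have hr : mapMirror rest = some ys' := by
            apply hrest.mpr
            intro j hj
            have := h' (j + 1) (by simpa using hj)
            simpa using this
          rw [hr]; simp [h0]

theorem getD_reverse (cs : List Char) (i : ℕ) (hi : i < cs.length) :
    cs.reverse.getD i ' ' = cs.getD (cs.length - 1 - i) ' ' := by
  rw [List.getD_eq_getElem?_getD, List.getD_eq_getElem?_getD,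
      List.getElem?_reverse hi]

-- the positional condition both programs decide
def Q (cs : List Char) (i : ℕ) : Prop :=
  mirroredTable.get? (cs.getD i ' ') = some (cs.getD (cs.length - 1 - i) ' ')

-- ---- characterisation of B's loop ----
theorem mirrorPairs_iff (cs : List Char) : ∀ k (j : ℕ), cs.length - j = k →
    (mirrorPairs cs (j : Int) ((cs.length : Int) - 1 - j) = true ↔
      ∀ i : ℕ, j ≤ i → 2 * (i : Int) ≤ (cs.length : Int) - 1 → Q cs i) := by
  intro k
  induction k using Nat.strong_induction_on with
  | _ k ih =>
    intro j hk
    rw [mirrorPairs]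
    have hj : ((j : Int)).toNat = j := by omega
    by_cases hlt : (j : Int) < (cs.length : Int) - 1 - j
    · -- lo < hi : one pair checked, then recurse
      have hhiN : (((cs.length : Int) - 1 - (j : Int))).toNat = cs.length - 1 - j := by omega
      have hrec := ih (cs.length - (j + 1)) (by omega) (j + 1) rfl
      have harith : ((j : Int)) + 1 = ((j + 1 : ℕ) : Int) := by push_cast; ring
      have harith2 : (cs.length : Int) - 1 - (j : Int) - 1 = (cs.length : Int) - 1 - ((j + 1 : ℕ) : Int) := by
        push_cast; ring
      rw [if_pos hlt, hj, hhiN]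
      by_cases hQ : Q cs j
      · have hQ' := hQ
        unfold Q at hQ'
        rw [if_neg (not_or.mpr ⟨by rw [hQ']; simp, not_not_intro hQ'⟩), harith, harith2, hrec]
        constructor
        · intro h i hji h2i
          rcases eq_or_lt_of_le hji with heq | hlt'
          · subst heq; exact hQ
          · exact h i hlt' h2i
        · intro h i hji h2i
          exact h i (by omega) h2i
      · unfold Q at hQ
        rw [if_pos (Or.inr hQ)]
        simp only [Bool.false_eq_true, false_iff]
        intro h
        exact hQ (h j le_rfl (by omega))
    · -- lo ≥ hi
      rw [if_neg hlt]
      by_cases heq : (j : Int) = (cs.length : Int) - 1 - j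
      · -- middle character
        have hmid : cs.length - 1 - j = j := by omega
        rw [if_pos heq, hj]
        simp only [beq_iff_eq]
        constructor
        · intro h i hji h2i
          have : i = j := by omega
          subst this
          unfold Q; rw [hmid]; exact h
        · intro h
          have := h j le_rfl (by omega)
          unfold Q at this; rw [hmid] at this; exact this
      · rw [if_neg heq]
        simp only [true_iff]
        intro i hji h2i
        omega

-- with the involution, the half-range condition extends to the full range
theorem half_iff_full (cs : List Char) :
    (∀ i : ℕ, 2 * (i : Int) ≤ (cs.length : Int) - 1 → Q cs i) ↔
      (∀ i < cs.length, Q cs i) := by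
  constructor
  · intro h i hi
    by_cases h2 : 2 * (i : Int) ≤ (cs.length : Int) - 1
    · exact h i h2
    · have hji : cs.length - 1 - (cs.length - 1 - i) = i := by omega
      have hq := h (cs.length - 1 - i) (by omega)
      unfold Q at hq ⊢
      rw [hji] at hq
      have := mirror_involution _ _ hq
      rw [this]
  · intro h i h2i
    exact h i (by omega)

-- ===== VERDICT (by name: the statement is the Claim_ definition above) =====
theorem is_mirrored_string_spec : Claim_equal_is_mirrored_string := by
  intro s _
  unfold Spec_is_mirrored_string
  set cs := s.toList with hcs
  rw [Bool.eq_iff_iff]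
  have hrev : PySem.List.slice? cs none none (-1) = some cs.reverse :=
    PySem.List.slice?_none_none_neg_one cs
  have hchar : mapMirror cs = some cs.reverse ↔ ∀ i < cs.length, Q cs i := by
    rw [mapMirror_iff cs cs.reverse (by simp)]
    unfold Q
    constructor
    · intro h i hi; rw [← getD_reverse cs i hi]; exact h i hi
    · intro h i hi; rw [getD_reverse cs i hi]; exact h i hi
  have hA : is_mirrored_string s = true ↔ mapMirror cs = some cs.reverse := by
    unfold is_mirrored_string
    rw [mirrorGo_eq, ← hcs]
    cases hm : mapMirror cs with
    | none => simp
    | some m =>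
      simp only [Option.map_some, List.nil_append, hrev]
      constructor
      · intro h
        split at h
        · rename_i heq
          simp at heq
          rw [heq]
        · simp at h
      · intro h
        simp at h
        simp [h]
  have hB : is_mirrored_string_alt s = true ↔
      ∀ i : ℕ, 2 * (i : Int) ≤ (cs.length : Int) - 1 → Q cs i := by
    unfold is_mirrored_string_alt
    rw [← hcs]
    have := mirrorPairs_iff cs (cs.length - 0) 0 rfl
    simpa using this
  rw [hA, hB, hchar, half_iff_full]
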